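-- pv_equiv track=rewrite | github.com/lerebel103/carlo-gavazzi-em540-bridge | bin/victron_em540_client.py | convert_int64
-- ===== SOURCE A (Python) =====
-- def convert_int64(registers, offset):
--     """Convert four 16-bit registers to a 64-bit signed integer (little-endian word order)."""
--     if offset + 3 >= len(registers):
--         return None
--     words = [registers[offset + i] & 0xFFFF for i in range(4)]
--     value = 0
--     for i, word in enumerate(words):
--         value |= word << (16 * i)
--     if value & (1 << 63):
--         value -= 1 << 64
--     return value
-- ===== SOURCE B (Python) =====
-- def convert_int64(registers, offset):
--     """Convert four 16-bit registers to a 64-bit signed integer (little-endian word order)."""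
--     if offset + 3 >= len(registers):
--         return None
--     buf = bytearray()
--     for i in range(4):
--         word = registers[offset + i] & 0xFFFF
--         buf.append(word & 0xFF)
--         buf.append((word >> 8) & 0xFF)
--     return int.from_bytes(buf, byteorder='little', signed=True)
-- ===== Notes on version B (the rewrite author's own statement) =====
-- stated objective: idiomatic
-- what changed: B replaces A's shift/or word assembly and explicit 1<<64 two's-complement subtraction by building the 8-byte little-endian buffer (low byte, high byte per masked word) and decoding it with int.from_bytes(..., byteorder='little', signed=True).
import Mathlib
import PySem

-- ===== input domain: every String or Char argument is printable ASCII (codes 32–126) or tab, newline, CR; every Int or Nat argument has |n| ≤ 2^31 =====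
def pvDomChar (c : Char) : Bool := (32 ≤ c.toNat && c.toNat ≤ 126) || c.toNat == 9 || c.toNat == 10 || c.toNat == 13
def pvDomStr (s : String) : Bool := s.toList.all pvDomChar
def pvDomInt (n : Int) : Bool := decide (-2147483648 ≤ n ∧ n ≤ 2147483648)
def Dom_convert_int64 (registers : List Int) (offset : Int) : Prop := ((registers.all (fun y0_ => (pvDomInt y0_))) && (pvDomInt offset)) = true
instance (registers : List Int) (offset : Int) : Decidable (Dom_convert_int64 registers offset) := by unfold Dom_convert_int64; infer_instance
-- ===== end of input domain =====

-- B replaces the shift/or word assembly and the explicit 1<<64 two's-complement fix by building the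
-- 8-byte little-endian buffer and decoding it with int.from_bytes(..., signed=True) (objective: idiomatic).

-- ===== PORT A =====
def convert_int64 (registers : List Int) (offset : Int) : Option Int :=
  if offset + 3 ≥ PySem.List.len registers then none
  else
    -- `registers[offset + i]`: pyGet? (negative indices wrap); `.getD 0` is never used inside
    -- Pre_convert_int64 (there pyGet? always returns some); outside Pre_ Python raises IndexError.
    let words := (PySem.List.pyRange 0 4 1).map
      (fun i => PySem.Int.band ((PySem.List.pyGet? registers (offset + i)).getD 0) 0xFFFF)
    let value := (PySem.List.enumerate words).foldl
      (fun (value : Int) (iw : Int × Int) => PySem.Int.bor value (iw.2 <<< (16 * iw.1))) (0 : Int)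
    let value := if PySem.Int.band value ((1 : Int) <<< 63) ≠ 0 then value - (1 : Int) <<< 64 else value
    some value

-- ===== PORT B =====
-- exact port of int.from_bytes(bs, byteorder='little', signed=True) for a list of byte values
def intFromBytesLESigned (bs : List Int) : Int :=
  let u := bs.foldr (fun b acc => acc * 256 + b) 0
  if 2 * u ≥ 2 ^ (8 * bs.length) then u - 2 ^ (8 * bs.length) else u

def convert_int64_alt (registers : List Int) (offset : Int) : Option Int :=
  if offset + 3 ≥ PySem.List.len registers then none
  else
    let buf := (PySem.List.pyRange 0 4 1).foldl
      (fun (buf : List Int) i =>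
        let word := PySem.Int.band ((PySem.List.pyGet? registers (offset + i)).getD 0) 0xFFFF
        buf ++ [PySem.Int.band word 0xFF, PySem.Int.band (word >>> 8) 0xFF]) []
    some (intFromBytesLESigned buf)

-- ===== PRECONDITION & SPEC =====
-- Pre_ excludes only the inputs where Python A raises IndexError (offset < -len with the length
-- guard passed); A returns a value everywhere inside Pre_.
def Pre_convert_int64 (registers : List Int) (offset : Int) : Prop :=
  offset + 3 ≥ PySem.List.len registers ∨ -(PySem.List.len registers) ≤ offset
instance (registers : List Int) (offset : Int) : Decidable (Pre_convert_int64 registers offset) := by unfold Pre_convert_int64; infer_instance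
def pvWitness_convert_int64 : List Int × Int := ([1, 2, 3, 4], 0)

def Spec_convert_int64 (registers : List Int) (offset : Int) (out : Option Int) : Prop := out = convert_int64_alt registers offset
instance (registers : List Int) (offset : Int) (out : Option Int) : Decidable (Spec_convert_int64 registers offset out) := by unfold Spec_convert_int64; infer_instance

-- ===== CLAIM (what is proved, stated in full; the proofs are below) =====
def Claim_equal_convert_int64 : Prop := ∀ (registers : List Int) (offset : Int), Dom_convert_int64 registers offset → Pre_convert_int64 registers offset → Spec_convert_int64 registers offset (convert_int64 registers offset)

-- ===== LEMMAS AND PROOFS =====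

-- x & 0xFFFF is a natural number below 2^16, for every Int x
lemma pvMask16 (x : Int) : ∃ n : Nat, PySem.Int.band x 65535 = (n : Int) ∧ n < 65536 := by
  rw [PySem.Int.band.eq_1]
  by_cases hx : (0:Int) ≤ x
  · rw [if_pos hx, if_pos (by norm_num : (0:Int) ≤ 65535)]
    refine ⟨x.toNat &&& (65535:Int).toNat, rfl, ?_⟩
    have h2 : (65535:Int).toNat = 65535 := rfl
    have h3 := Nat.and_two_pow_sub_one_eq_mod x.toNat 16
    norm_num at h3
    rw [h2, h3]; omega
  · rw [if_neg hx, if_pos (by norm_num : (0:Int) ≤ 65535)]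
    refine ⟨(65535:Int).toNat - ((65535:Int).toNat &&& (-x-1).toNat), rfl, ?_⟩
    have h2 : (65535:Int).toNat = 65535 := rfl
    calc (65535:Int).toNat - ((65535:Int).toNat &&& (-x-1).toNat) ≤ (65535:Int).toNat :=
          Nat.sub_le _ _
      _ < 65536 := by rw [h2]; omega

-- or of bit-disjoint parts is addition
lemma pvLorShl (a b k : Nat) (h : a < 2 ^ k) : a ||| b * 2 ^ k = a + b * 2 ^ k := by
  have h1 : (a ||| b * 2 ^ k) % 2 ^ k = a := by
    simp [Nat.or_mod_two_pow, Nat.mul_mod_left, Nat.mod_eq_of_lt h]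
  have h2 : (a ||| b * 2 ^ k) / 2 ^ k = b := by
    rw [Nat.or_div_two_pow, Nat.div_eq_of_lt h, Nat.mul_div_cancel _ (Nat.two_pow_pos k)]
    exact Nat.zero_or b
  calc a ||| b * 2 ^ k
      = 2 ^ k * ((a ||| b * 2 ^ k) / 2 ^ k) + (a ||| b * 2 ^ k) % 2 ^ k :=
        (Nat.div_add_mod _ _).symm
    _ = 2 ^ k * b + a := by rw [h1, h2]
    _ = a + b * 2 ^ k := by ring

-- the sign bit of a 64-bit value
lemma pvSignBit (u : Nat) (h : u < 18446744073709551616) :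
    (u &&& 9223372036854775808 ≠ 0) ↔ 9223372036854775808 ≤ u := by
  have e : (9223372036854775808 : Nat) = 2 ^ 63 := by norm_num
  rw [e, Nat.and_two_pow, Nat.testBit_eq_decide_div_mod_eq]
  rcases Nat.lt_or_ge u (2 ^ 63) with hlt | hge
  · have hd : u / 2 ^ 63 % 2 = 0 := by omega
    simp
    all_goals omega
  · have hd : u / 2 ^ 63 % 2 = 1 := by omega
    simp
    all_goals omega

-- n & 0xFF for a natural byte source
lemma pvBandLow (n : Nat) : PySem.Int.band (n : Int) 255 = ((n % 256 : Nat) : Int) := by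
  have h : (255:Int) = ((255:Nat):Int) := rfl
  rw [h, PySem.Int.band_natCast]
  have h8 := Nat.and_two_pow_sub_one_eq_mod n 8
  norm_num at h8
  rw [h8]

-- n >> 8 for a natural source
lemma pvShr8 (n : Nat) : ((n : Int) >>> (8:Int)) = ((n / 256 : Nat) : Int) := by
  have h : (8:Int) = ((8:Nat):Int) := rfl
  rw [h, Int.shiftRight_natCast, Nat.shiftRight_eq_div_pow]

-- ===== VERDICT (by name: the statement is the Claim_ definition above) =====
theorem convert_int64_spec : Claim_equal_convert_int64 := by
  intro registers offset _hdom _hpre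
  unfold Spec_convert_int64 convert_int64 convert_int64_alt
  by_cases hg : offset + 3 >= PySem.List.len registers
  · rw [if_pos hg, if_pos hg]
  · rw [if_neg hg, if_neg hg]
    have hr : PySem.List.pyRange 0 4 1 = [0, 1, 2, 3] := by decide
    simp only [hr, List.map_cons, List.map_nil, PySem.List.enumerate, List.foldl_cons,
      List.foldl_nil, List.nil_append, List.cons_append]
    generalize (PySem.List.pyGet? registers (offset + 0)).getD 0 = x0
    generalize (PySem.List.pyGet? registers (offset + 1)).getD 0 = x1
    generalize (PySem.List.pyGet? registers (offset + 2)).getD 0 = x2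
    generalize (PySem.List.pyGet? registers (offset + 3)).getD 0 = x3
    obtain ⟨n0, e0, b0⟩ := pvMask16 x0
    obtain ⟨n1, e1, b1⟩ := pvMask16 x1
    obtain ⟨n2, e2, b2⟩ := pvMask16 x2
    obtain ⟨n3, e3, b3⟩ := pvMask16 x3
    rw [e0, e1, e2, e3]
    have c0 : ((n0:Int) <<< (16 * 0 : Int)) = ((n0 : Nat) : Int) := by
      rw [show (16*0:Int) = ((0:Nat):Int) by norm_num, Int.shiftLeft_eq_mul_pow]; norm_num
    have c1 : ((n1:Int) <<< (16 * (0+1) : Int)) = ((n1 * 65536 : Nat) : Int) := by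
      rw [show (16*(0+1):Int) = ((16:Nat):Int) by norm_num, Int.shiftLeft_eq_mul_pow]
      push_cast; norm_num
    have c2 : ((n2:Int) <<< (16 * (0+1+1) : Int)) = ((n2 * 4294967296 : Nat) : Int) := by
      rw [show (16*(0+1+1):Int) = ((32:Nat):Int) by norm_num, Int.shiftLeft_eq_mul_pow]
      push_cast; norm_num
    have c3 : ((n3:Int) <<< (16 * (0+1+1+1) : Int)) = ((n3 * 281474976710656 : Nat) : Int) := by
      rw [show (16*(0+1+1+1):Int) = ((48:Nat):Int) by norm_num, Int.shiftLeft_eq_mul_pow]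
      push_cast; norm_num
    rw [c0, c1, c2, c3]
    have z0 : PySem.Int.bor 0 ((n0:Nat):Int) = ((n0:Nat):Int) := by
      rw [show (0:Int) = ((0:Nat):Int) from rfl, PySem.Int.bor_natCast, Nat.zero_or]
    have r1 : PySem.Int.bor ((n0:Nat):Int) ((n1 * 65536 : Nat):Int) = ((n0 + n1 * 65536 : Nat):Int) := by
      rw [PySem.Int.bor_natCast]
      congr 1
      have := pvLorShl n0 n1 16 (by omega)
      norm_num at this
      exact this
    have r2 : PySem.Int.bor ((n0 + n1 * 65536 : Nat):Int) ((n2 * 4294967296 : Nat):Int) =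
        ((n0 + n1 * 65536 + n2 * 4294967296 : Nat):Int) := by
      rw [PySem.Int.bor_natCast]
      congr 1
      have := pvLorShl (n0 + n1 * 65536) n2 32 (by omega)
      norm_num at this
      exact this
    have r3 : PySem.Int.bor ((n0 + n1 * 65536 + n2 * 4294967296 : Nat):Int)
        ((n3 * 281474976710656 : Nat):Int) =
        ((n0 + n1 * 65536 + n2 * 4294967296 + n3 * 281474976710656 : Nat):Int) := by
      rw [PySem.Int.bor_natCast]
      congr 1
      have := pvLorShl (n0 + n1 * 65536 + n2 * 4294967296) n3 48 (by omega)
      norm_num at this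
      exact this
    rw [z0, r1, r2, r3]
    have s1 : PySem.Int.band
        ((n0 + n1 * 65536 + n2 * 4294967296 + n3 * 281474976710656 : Nat):Int) ((1:Int) <<< 63) =
        (((n0 + n1 * 65536 + n2 * 4294967296 + n3 * 281474976710656) &&& 9223372036854775808 : Nat) : Int) := by
      rw [show ((1:Int) <<< 63) = ((9223372036854775808:Nat):Int) from by decide, PySem.Int.band_natCast]
    rw [s1]
    rw [pvShr8 n0, pvShr8 n1, pvShr8 n2, pvShr8 n3]
    rw [pvBandLow n0, pvBandLow (n0 / 256), pvBandLow n1, pvBandLow (n1 / 256),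
      pvBandLow n2, pvBandLow (n2 / 256), pvBandLow n3, pvBandLow (n3 / 256)]
    simp only [intFromBytesLESigned, List.foldr_cons, List.foldr_nil, List.length_cons,
      List.length_nil]
    have hu : n0 + n1 * 65536 + n2 * 4294967296 + n3 * 281474976710656 < 18446744073709551616 := by
      omega
    simp only [Int.natCast_ne_zero, pvSignBit _ hu]
    rw [show ((1:Int) <<< 64) = 18446744073709551616 from by decide]
    norm_num
    split_ifs with hA hB hB
    · omega
    · exfalso
      push_cast at hB
      omega
    · exfalso
      push_cast at hB
      omega
    · omega
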